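-- pv_equiv track=rewrite | github.com/cosmosZhou/sympy | util/utility.py | recursive_construct
-- ===== SOURCE A (Python) =====
-- def recursive_construct(parentheses, depth):
--     mid = len(parentheses) // 2
--     start = parentheses[:mid]
--     end = parentheses[mid:]
--
--     if start in {"(", ")", "{", "}"}:
--         start = "\\" + start
--         end = "\\" + end
--
--     if depth == 1:
--         return "%s[^%s]*%s" % (start, parentheses, end)
--     return "%s[^%s]*(?:" % (start, parentheses) + recursive_construct(parentheses, depth - 1) + "[^%s]*)*%s" % (parentheses, end)
-- ===== SOURCE B (Python) =====
-- def recursive_construct(parentheses, depth):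
--     mid = len(parentheses) // 2
--     start = parentheses[:mid]
--     end = parentheses[mid:]
--
--     if start in {"(", ")", "{", "}"}:
--         start = "\\" + start
--         end = "\\" + end
--
--     result = "%s[^%s]*%s" % (start, parentheses, end)
--     for _ in range(depth - 1):
--         result = "%s[^%s]*(?:" % (start, parentheses) + result + "[^%s]*)*%s" % (parentheses, end)
--     return result
-- ===== Notes on version B (the rewrite author's own statement) =====
-- stated objective: simpler
-- what changed: Replaced the linear recursion by a single accumulation loop: compute mid/start/end once, start from the innermost base pattern and wrap it depth-1 times; Pre_ excludes depth <= 0, where A recurses forever (RecursionError).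
import Mathlib
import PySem

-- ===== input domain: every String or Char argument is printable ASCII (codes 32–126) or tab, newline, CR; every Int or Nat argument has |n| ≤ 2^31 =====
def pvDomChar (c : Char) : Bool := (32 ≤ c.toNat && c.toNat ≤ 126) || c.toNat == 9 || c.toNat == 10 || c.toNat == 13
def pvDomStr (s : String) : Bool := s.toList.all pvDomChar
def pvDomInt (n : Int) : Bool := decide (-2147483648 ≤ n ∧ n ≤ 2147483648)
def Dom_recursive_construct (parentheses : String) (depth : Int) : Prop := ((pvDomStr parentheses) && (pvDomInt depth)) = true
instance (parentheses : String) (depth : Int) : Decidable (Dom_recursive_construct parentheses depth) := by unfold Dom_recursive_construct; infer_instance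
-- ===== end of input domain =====

-- B replaces A's linear recursion by one accumulation loop, wrapping the base pattern depth-1 times
-- (return-value equivalence proved for depth ≥ 1; for depth ≤ 0 A raises RecursionError, B returns the base pattern).

-- ===== PORT A =====
-- the recursion of A, on the fuel depth.toNat (Python diverges for depth ≤ 0, excluded by Pre_;
-- the fuel-0 case is unreachable inside Pre_ and returns []).
def recursive_construct_rec (ps start end_ : List Char) : Nat → List Char
  | 0 => []
  | 1 => start ++ "[^".toList ++ ps ++ "]*".toList ++ end_
  | n + 2 =>
      start ++ "[^".toList ++ ps ++ "]*(?:".toList ++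
        recursive_construct_rec ps start end_ (n + 1) ++
        "[^".toList ++ ps ++ "]*)*".toList ++ end_

def recursive_construct (parentheses : String) (depth : Int) : String :=
  let ps := parentheses.toList
  let mid := PySem.Int.floordiv (ps.length : Int) 2
  let start := PySem.List.slice ps none (some mid)
  let end_ := PySem.List.slice ps (some mid) none
  let escape := start = "(".toList ∨ start = ")".toList ∨ start = "{".toList ∨ start = "}".toList
  let start := if escape then '\\' :: start else start
  let end_ := if escape then '\\' :: end_ else end_
  String.ofList (recursive_construct_rec ps start end_ depth.toNat)

-- ===== PORT B =====
def recursive_construct_alt (parentheses : String) (depth : Int) : String :=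
  let ps := parentheses.toList
  let mid := PySem.Int.floordiv (ps.length : Int) 2
  let start := PySem.List.slice ps none (some mid)
  let end_ := PySem.List.slice ps (some mid) none
  let escape := start = "(".toList ∨ start = ")".toList ∨ start = "{".toList ∨ start = "}".toList
  let start := if escape then '\\' :: start else start
  let end_ := if escape then '\\' :: end_ else end_
  let base := start ++ "[^".toList ++ ps ++ "]*".toList ++ end_
  let result := (List.range (depth - 1).toNat).foldl
    (fun r _ =>
      start ++ "[^".toList ++ ps ++ "]*(?:".toList ++ r ++
        "[^".toList ++ ps ++ "]*)*".toList ++ end_)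
    base
  String.ofList result

-- ===== PRECONDITION & SPEC =====
-- Pre_ excludes exactly depth ≤ 0, on which Python A recurses without bound (RecursionError).
def Pre_recursive_construct (parentheses : String) (depth : Int) : Prop := 1 ≤ depth
instance (parentheses : String) (depth : Int) : Decidable (Pre_recursive_construct parentheses depth) := by unfold Pre_recursive_construct; infer_instance
def pvWitness_recursive_construct : String × Int := ("()", 3)

def Spec_recursive_construct (parentheses : String) (depth : Int) (out : String) : Prop := out = recursive_construct_alt parentheses depth
instance (parentheses : String) (depth : Int) (out : String) : Decidable (Spec_recursive_construct parentheses depth out) := by unfold Spec_recursive_construct; infer_instance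

-- ===== CLAIM (what is proved, stated in full; the proofs are below) =====
def Claim_equal_recursive_construct : Prop := ∀ (parentheses : String) (depth : Int), Dom_recursive_construct parentheses depth → Pre_recursive_construct parentheses depth → Spec_recursive_construct parentheses depth (recursive_construct parentheses depth)

-- ===== LEMMAS AND PROOFS =====
-- A's recursion at fuel n+1 equals B's loop wrapping the base pattern n times.
theorem rec_eq_foldl (ps start end_ : List Char) (n : Nat) :
    recursive_construct_rec ps start end_ (n + 1) =
      (List.range n).foldl
        (fun r _ =>
          start ++ "[^".toList ++ ps ++ "]*(?:".toList ++ r ++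
            "[^".toList ++ ps ++ "]*)*".toList ++ end_)
        (start ++ "[^".toList ++ ps ++ "]*".toList ++ end_) := by
  induction n with
  | zero => simp [recursive_construct_rec]
  | succ n ih =>
      rw [List.range_succ, List.foldl_append, ← ih]
      simp [recursive_construct_rec]

-- ===== VERDICT (by name: the statement is the Claim_ definition above) =====
theorem recursive_construct_spec : Claim_equal_recursive_construct := by
  intro parentheses depth _ hpre
  unfold Spec_recursive_construct recursive_construct recursive_construct_alt
  have h : depth.toNat = (depth - 1).toNat + 1 := by
    unfold Pre_recursive_construct at hpre; omega
  rw [h]; simp only [rec_eq_foldl]
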